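-- pv_equiv track=rewrite | github.com/troy12x/QUASAR-TAO | hfa_subnet/neurons/validator.py | generate_scaling_context
-- ===== SOURCE A (Python) =====
-- def generate_scaling_context(length: int) -> str:
--     """Generate context for scaling tests"""
--
--     # Create coherent narrative that scales to target length
--     base_story = """
--     In a distant future, humanity had developed the technology for infinite context processing.
--     The breakthrough came from a revolutionary architecture called Hierarchical Flow Anchoring.
--     This system could maintain perfect memory retention across unlimited sequence lengths.
--     Unlike traditional attention mechanisms that degraded quadratically, HFA scaled linearly.
--     """
--
--     # Repeat and extend the story to reach target length
--     words = base_story.split()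
--     extended_words = []
--
--     while len(extended_words) < length:
--         extended_words.extend(words)
--         # Add connecting phrases
--         extended_words.extend([
--             "Furthermore,", "Additionally,", "Moreover,", "In", "addition,",
--             "The", "system", "continued", "to", "demonstrate", "remarkable", "capabilities."
--         ])
--
--     return " ".join(extended_words[:length])
-- ===== SOURCE B (Python) =====
-- def generate_scaling_context(length: int) -> str:
--     """Generate context for scaling tests"""
--
--     base_story = """
--     In a distant future, humanity had developed the technology for infinite context processing.
--     The breakthrough came from a revolutionary architecture called Hierarchical Flow Anchoring.
--     This system could maintain perfect memory retention across unlimited sequence lengths.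
--     Unlike traditional attention mechanisms that degraded quadratically, HFA scaled linearly.
--     """
--
--     # The text is periodic: position i always holds block[i % len(block)].
--     # So pick each of the `length` output words directly by modular indexing,
--     # never materialising a repeated list at all.
--     block = base_story.split() + [
--         "Furthermore,", "Additionally,", "Moreover,", "In", "addition,",
--         "The", "system", "continued", "to", "demonstrate", "remarkable", "capabilities.",
--     ]
--     n = len(block)
--     return " ".join(block[i % n] for i in range(length))
-- ===== Notes on version B (the rewrite author's own statement) =====
-- stated objective: alternative
-- what changed: Instead of growing a list by repeated extension until it covers the target length and truncating, B exploits periodicity and selects each output word directly as block[i % len(block)] over range(length), never building a repeated list.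
import Mathlib
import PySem

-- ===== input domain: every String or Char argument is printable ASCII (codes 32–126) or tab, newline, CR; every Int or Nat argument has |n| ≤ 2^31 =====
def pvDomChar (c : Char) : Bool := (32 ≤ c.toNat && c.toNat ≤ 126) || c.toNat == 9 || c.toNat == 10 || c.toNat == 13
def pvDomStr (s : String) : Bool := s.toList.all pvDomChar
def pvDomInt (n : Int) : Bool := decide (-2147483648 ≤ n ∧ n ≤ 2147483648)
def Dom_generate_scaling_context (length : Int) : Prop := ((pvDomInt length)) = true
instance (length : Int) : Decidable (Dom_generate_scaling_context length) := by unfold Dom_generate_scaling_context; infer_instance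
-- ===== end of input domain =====

-- B replaces A's grow-a-list-by-repeated-extension loop by direct modular indexing:
-- output word i is block[i % len(block)] (objective: alternative; return value only).

-- ===== PORT A =====
def pvBaseStory : String := "\n    In a distant future, humanity had developed the technology for infinite context processing.\n    The breakthrough came from a revolutionary architecture called Hierarchical Flow Anchoring.\n    This system could maintain perfect memory retention across unlimited sequence lengths.\n    Unlike traditional attention mechanisms that degraded quadratically, HFA scaled linearly.\n    "

def pvConnecting : List String :=
  ["Furthermore,", "Additionally,", "Moreover,", "In", "addition,",
   "The", "system", "continued", "to", "demonstrate", "remarkable", "capabilities."]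

-- the while-loop of A: extend by words then by the connecting phrases until the target length
def pvLoopA (length : Int) (words acc : List String) : List String :=
  if _h : (acc.length : Int) < length then
    pvLoopA length words (acc ++ words ++ pvConnecting)
  else acc
termination_by (length - acc.length).toNat
decreasing_by
  have : acc.length < (acc ++ words ++ pvConnecting).length := by
    simp [List.length_append, pvConnecting]
  omega

def generate_scaling_context (length : Int) : String :=
  let words := PySem.Str.split₀ pvBaseStory
  let extended_words := pvLoopA length words []
  PySem.Str.join " " (PySem.List.slice extended_words none (some length))

-- ===== PORT B =====
def generate_scaling_context_alt (length : Int) : String :=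
  let block := PySem.Str.split₀ pvBaseStory ++ pvConnecting
  let n : Int := block.length
  PySem.Str.join " "
    ((PySem.List.pyRange 0 length 1).map
      (fun i => PySem.List.pyGetD block (PySem.Int.mod i n) ""))

-- ===== PRECONDITION & SPEC =====
def Spec_generate_scaling_context (length : Int) (out : String) : Prop := out = generate_scaling_context_alt length
instance (length : Int) (out : String) : Decidable (Spec_generate_scaling_context length out) := by unfold Spec_generate_scaling_context; infer_instance

-- ===== CLAIM (what is proved, stated in full; the proofs are below) =====
def Claim_equal_generate_scaling_context : Prop := ∀ (length : Int), Dom_generate_scaling_context length → Spec_generate_scaling_context length (generate_scaling_context length)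

-- ===== LEMMAS AND PROOFS =====

theorem flatten_replicate_length {α : Type} (k : Nat) (l : List α) :
    ((List.replicate k l).flatten).length = k * l.length := by
  induction k with
  | zero => simp
  | succ k ih => simp [List.replicate_succ, ih]; ring

theorem getElem_flatten_replicate {α : Type} (l : List α) (k i : Nat)
    (hl : 0 < l.length) (h : i < k * l.length) :
    ((List.replicate k l).flatten).getD i l[0] = l[i % l.length]'(Nat.mod_lt _ hl) := by
  induction k generalizing i with
  | zero => omega
  | succ k ih =>
    rw [List.replicate_succ, List.flatten_cons]
    by_cases hi : i < l.length
    · have hlen : (l ++ (List.replicate k l).flatten).length = (k+1) * l.length := by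
        rw [List.length_append, flatten_replicate_length]; ring
      rw [List.getD_eq_getElem _ _ (by omega),
        List.getElem_append_left hi]
      simp [Nat.mod_eq_of_lt hi]
    · have hlen : (l ++ (List.replicate k l).flatten).length = (k+1) * l.length := by
        rw [List.length_append, flatten_replicate_length]; ring
      have hexp : (k + 1) * l.length = k * l.length + l.length := by ring
      have h2 : i - l.length < k * l.length := by omega
      have := ih (i - l.length) h2
      rw [List.getD_eq_getElem _ _ (by omega),
        List.getElem_append_right (Nat.le_of_not_lt hi)]
      rw [List.getD_eq_getElem _ _ (by rw [flatten_replicate_length]; omega)] at this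
      rw [this]
      congr 1
      rcases Nat.exists_eq_add_of_le (Nat.le_of_not_lt hi) with ⟨j, hj⟩
      subst hj
      simp [Nat.add_mod_left]

theorem take_flatten_replicate_eq_map_range {α : Type} (l : List α) (n k : Nat)
    (hl : 0 < l.length) (hn : n ≤ k * l.length) :
    ((List.replicate k l).flatten).take n
      = (List.range n).map (fun i => l.getD (i % l.length) l[0]) := by
  apply List.ext_getElem
  · rw [List.length_take, List.length_map, List.length_range, flatten_replicate_length]; omega
  · intro i h1 h2
    have hi : i < n := by simpa using h2
    have hik : i < k * l.length := by omega
    rw [List.getElem_take, List.getElem_map, List.getElem_range]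
    rw [← List.getD_eq_getElem _ _ (by rw [flatten_replicate_length]; omega)]
    rw [getElem_flatten_replicate l k i hl hik]
    rw [List.getD_eq_getElem _ _ (Nat.mod_lt _ hl)]

theorem pvLoopA_rep (length : Int) (words acc : List String) :
    ∃ k, pvLoopA length words acc = acc ++ (List.replicate k (words ++ pvConnecting)).flatten := by
  fun_induction pvLoopA length words acc with
  | case1 acc h ih =>
    obtain ⟨k, hk⟩ := ih
    exact ⟨k + 1, by rw [hk]; simp [List.replicate_succ]⟩
  | case2 acc h => exact ⟨0, by simp⟩

theorem pvLoopA_ge (length : Int) (words acc : List String) :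
    length ≤ ((pvLoopA length words acc).length : Int) := by
  fun_induction pvLoopA length words acc with
  | case1 acc h ih => exact ih
  | case2 acc h => omega

set_option maxRecDepth 8192 in
set_option maxHeartbeats 1600000 in
theorem generate_scaling_context_spec : Claim_equal_generate_scaling_context := by
  intro length _
  unfold Spec_generate_scaling_context generate_scaling_context generate_scaling_context_alt
  simp only []
  set W := PySem.Str.split₀ pvBaseStory with hW
  set block := W ++ pvConnecting with hblock
  have hBpos : 0 < block.length := by
    rw [hblock]; simp [pvConnecting]
  obtain ⟨k, hk⟩ := pvLoopA_rep length W []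
  have hge := pvLoopA_ge length W []
  rw [List.nil_append] at hk
  by_cases hpos : 0 < length
  case neg =>
    have hA : pvLoopA length W [] = [] := by
      rw [pvLoopA, dif_neg (by omega)]
    rw [hA, PySem.List.pyRange_one_eq_nil (by omega)]
    simp [PySem.List.slice]
  case pos =>
    have hslice : PySem.List.slice (pvLoopA length W []) none (some length)
        = (pvLoopA length W []).take length.toNat :=
      PySem.List.slice_to _ (by omega)
    rw [hslice, hk, ← hblock]
    have hkbound : length.toNat ≤ k * block.length := by
      rw [hk, flatten_replicate_length, ← hblock] at hge
      have : (length.toNat : Int) ≤ (k : Int) * (block.length : Int) := by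
        push_cast at hge ⊢; omega
      exact_mod_cast this
    rw [take_flatten_replicate_eq_map_range block length.toNat k hBpos hkbound]
    congr 1
    rw [PySem.List.pyRange_one]
    rw [List.map_map, Int.sub_zero]
    apply List.map_congr_left
    intro i hi
    have hmod : PySem.Int.mod ((0 : Int) + i) (block.length : Int)
        = ((i % block.length : Nat) : Int) := by
      rw [Int.zero_add]
      exact_mod_cast PySem.Int.mod_natCast i block.length
    simp only [Function.comp, hmod]
    rw [PySem.List.pyGetD_natCast]
    rw [List.getD_eq_getElem _ _ (Nat.mod_lt _ hBpos),
        List.getD_eq_getElem _ _ (Nat.mod_lt _ hBpos)]
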